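-- pv_equiv track=rewrite | github.com/elementare/pMHC_graph | immunograph/utils/tools.py | indices_graphs
-- ===== SOURCE A (Python) =====
-- from typing import Any, FrozenSet, Tuple, List, Optional, Union, Dict, Set, Iterable, Sequence#, TypeVarTuple, Unpack
--
-- def indices_graphs(nodes_lists: List[List]) -> List[Tuple[int, int]]:
--     """Make a list that contains indices that indicates the position of each protein in graph
--
--     Args:
--         nodes_list (List): A list of protein's resdiues. Each List has their own residues.
--
--     Returns:
--         ranges (List[Tuple]): A list of indicesthat indicates the position of each protein in matrix
--     """
--
--     current = 0
--     ranges = []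
--     for nodes in nodes_lists:
--         length = len(nodes)
--         ranges.append((current, current + length))
--         current += length
--     return ranges
-- ===== SOURCE B (Python) =====
-- from typing import List, Tuple
--
-- def indices_graphs(nodes_lists: List[List]) -> List[Tuple[int, int]]:
--     lengths = [len(nodes) for nodes in nodes_lists]
--     return [(sum(lengths[:i]), sum(lengths[:i + 1])) for i in range(len(lengths))]
-- ===== Notes on version B (the rewrite author's own statement) =====
-- stated objective: alternative
-- what changed: Replaces the single running-offset accumulator loop with a positional brute-force formulation: the i-th range is computed independently as (sum of the first i lengths, sum of the first i+1 lengths), recomputing each prefix sum from scratch.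
import Mathlib
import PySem

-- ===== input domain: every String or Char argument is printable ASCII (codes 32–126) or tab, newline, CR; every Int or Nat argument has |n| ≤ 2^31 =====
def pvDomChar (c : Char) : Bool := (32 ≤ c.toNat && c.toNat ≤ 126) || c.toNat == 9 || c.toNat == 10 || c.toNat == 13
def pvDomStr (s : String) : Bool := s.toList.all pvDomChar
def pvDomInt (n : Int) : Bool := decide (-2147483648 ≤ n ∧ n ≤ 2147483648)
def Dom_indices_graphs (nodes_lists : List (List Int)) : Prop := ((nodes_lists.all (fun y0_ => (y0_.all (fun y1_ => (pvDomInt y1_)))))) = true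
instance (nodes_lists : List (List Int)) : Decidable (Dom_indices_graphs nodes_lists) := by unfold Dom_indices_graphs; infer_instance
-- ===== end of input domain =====

-- B recomputes each range independently from prefix sums of the length table (brute force), instead of A's running-offset loop; no speed claim.
-- ===== PORT A =====
def indices_graphs (nodes_lists : List (List Int)) : List (Int × Int) :=
  (nodes_lists.foldl
    (fun (st : Int × List (Int × Int)) nodes =>
      let length : Int := nodes.length
      (st.1 + length, st.2 ++ [(st.1, st.1 + length)]))
    (0, [])).2

-- ===== PORT B =====
def indices_graphs_alt (nodes_lists : List (List Int)) : List (Int × Int) :=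
  let lengths := nodes_lists.map (fun nodes => (nodes.length : Int))
  (List.range lengths.length).map (fun i => ((lengths.take i).sum, (lengths.take (i + 1)).sum))

-- ===== PRECONDITION & SPEC =====
def Spec_indices_graphs (nodes_lists : List (List Int)) (out : List (Int × Int)) : Prop := out = indices_graphs_alt nodes_lists
instance (nodes_lists : List (List Int)) (out : List (Int × Int)) : Decidable (Spec_indices_graphs nodes_lists out) := by unfold Spec_indices_graphs; infer_instance

-- ===== CLAIM (what is proved, stated in full; the proofs are below) =====
def Claim_equal_indices_graphs : Prop := ∀ (nodes_lists : List (List Int)), Dom_indices_graphs nodes_lists → Spec_indices_graphs nodes_lists (indices_graphs nodes_lists)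

-- ===== LEMMAS AND PROOFS =====
lemma indices_graphs_loop (ls : List (List Int)) (c : Int) (acc : List (Int × Int)) :
    (ls.foldl
      (fun (st : Int × List (Int × Int)) nodes =>
        let length : Int := nodes.length
        (st.1 + length, st.2 ++ [(st.1, st.1 + length)]))
      (c, acc)).2 =
    acc ++ (List.range ls.length).map (fun i =>
      (c + ((ls.map (fun nodes => (nodes.length : Int))).take i).sum,
       c + ((ls.map (fun nodes => (nodes.length : Int))).take (i + 1)).sum)) := by
  induction ls generalizing c acc with
  | nil => simp
  | cons h t ih =>
    simp only [List.foldl_cons]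
    rw [ih]
    simp [List.range_succ_eq_map, List.map_map, Function.comp, add_assoc]

-- ===== VERDICT (by name: the statement is the Claim_ definition above) =====
theorem indices_graphs_spec : Claim_equal_indices_graphs := by
  intro ls _
  unfold Spec_indices_graphs indices_graphs indices_graphs_alt
  simpa using indices_graphs_loop ls 0 []
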